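-- pv_equiv track=rewrite | github.com/almala333/EEBE-problemas-Jutge-Q1-24-25 | 03_Iteraciones/X70576_Chase.py | persecucion
-- ===== SOURCE A (Python) =====
-- def persecucion(m1, m2, dini):
--     '''
--     Parametres
--     ----------
--     m1 : str
--         Cadena de caràcters que representa el moviment de l'objecte 1.
--     m2 : str
--         Cadena de caràcters que representa el moviment de l'objecte 2.
--     dini : int
--         Distància inicial entre els dos objectes.
--
--     Retorna
--     -------
--     int : El nombre de passos que triguen els objectes a trobar-se, o -1 si no es troben mai.
--
--     Tests públics (podeu posar els del Jutge)
--     -------------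
--     >>> persecucion('++=+++++', '+++==+==++', 1)
--     5
--     >>> persecucion('++=++++++==', '+++==+==+', 17)
--     -1
--
--
--     Tests privats
--     -------------
--     >>> persecucion('++++', '++++', 0)
--     1
--     >>> persecucion('++++', '====', 2)
--     2
--     >>> persecucion('====', '++++', 10)
--     -1
--     >>> persecucion('+++++++', '+', 5)
--     6
--     '''
--     pos1 = 0
--     pos2 = dini
--     for i in range(min(len(m1), len(m2))):
--         if m1[i] == '+':
--             pos1 += 1
--         if m2[i] == '+':
--             pos2 += 1
--         if pos1 >= pos2:
--             return i + 1
--     if len(m1) > len(m2):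
--         for i in range(len(m2), len(m1)):
--             if m1[i] == '+':
--                 pos1 += 1
--             if pos1 >= pos2:
--                 return i + 1
--     elif len(m2) > len(m1):
--         for i in range(len(m1), len(m2)):
--             if m2[i] == '+':
--                 pos2 += 1
--     return -1
-- ===== SOURCE B (Python) =====
-- def persecucion(m1, m2, dini):
--     # Declarative reformulation: the catch happens at the first step i (1-based)
--     # such that the number of '+' in m1[:i] exceeds the number of '+' in m2[:i]
--     # by at least dini; a catch past len(m1) steps is impossible because the
--     # chaser's count then freezes while the target's only grows.  Slicing
--     # m2[:i] clamps, which matches the frozen pos2 of the original tail phase.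
--     for i in range(1, len(m1) + 1):
--         if m1[:i].count('+') - m2[:i].count('+') >= dini:
--             return i
--     return -1
-- ===== Notes on version B (the rewrite author's own statement) =====
-- stated objective: alternative
-- what changed: Replaces A's three incremental-counter phase loops with a declarative search for the first 1-based step i at which the '+'-count of the prefix m1[:i] exceeds that of m2[:i] (clamped) by at least dini, recounting each prefix with str.count; correct because a catch past len(m1) steps is impossible (the chaser's count freezes while the target's only grows).
import Mathlib
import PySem

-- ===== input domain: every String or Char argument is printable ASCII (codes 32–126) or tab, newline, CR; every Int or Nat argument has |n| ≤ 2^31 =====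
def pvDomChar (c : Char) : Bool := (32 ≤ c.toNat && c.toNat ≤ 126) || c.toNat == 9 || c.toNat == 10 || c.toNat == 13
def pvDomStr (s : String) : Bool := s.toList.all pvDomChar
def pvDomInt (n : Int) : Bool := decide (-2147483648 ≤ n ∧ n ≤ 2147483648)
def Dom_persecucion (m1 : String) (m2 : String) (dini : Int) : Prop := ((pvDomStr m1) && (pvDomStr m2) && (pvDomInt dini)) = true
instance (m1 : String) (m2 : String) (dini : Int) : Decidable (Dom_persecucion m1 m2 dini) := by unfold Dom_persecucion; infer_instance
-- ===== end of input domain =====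

-- ===== PORT A =====
-- B changes: instead of A's three phase loops with incremental counters, B searches for the
-- first 1-based step whose prefix '+'-counts already witness the catch (objective: alternative;
-- B recounts each prefix, so it costs more per step — no speed is claimed).

-- phase 1: for i in range(min(len(m1),len(m2))) — consumes both lists in step;
-- returns .inl (i+1) on early return, .inr (pos1,pos2) when the range is exhausted.
def persecucionLoop1 : List Char → List Char → Int → Int → Int → Int ⊕ (Int × Int)
  | c1 :: t1, c2 :: t2, pos1, pos2, i =>
      let pos1 := if c1 = '+' then pos1 + 1 else pos1
      let pos2 := if c2 = '+' then pos2 + 1 else pos2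
      if pos1 ≥ pos2 then .inl (i + 1) else persecucionLoop1 t1 t2 pos1 pos2 (i + 1)
  | _, _, pos1, pos2, _ => .inr (pos1, pos2)

-- phase 2: for i in range(len(m2), len(m1)) when m1 is longer
def persecucionLoop2 : List Char → Int → Int → Int → Int
  | c1 :: t1, pos1, pos2, i =>
      let pos1 := if c1 = '+' then pos1 + 1 else pos1
      if pos1 ≥ pos2 then i + 1 else persecucionLoop2 t1 pos1 pos2 (i + 1)
  | [], _, _, _ => -1

def persecucion (m1 : String) (m2 : String) (dini : Int) : Int :=
  let cs1 := m1.toList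
  let cs2 := m2.toList
  match persecucionLoop1 cs1 cs2 0 dini 0 with
  | .inl r => r
  | .inr (pos1, pos2) =>
    if cs1.length > cs2.length then
      persecucionLoop2 (cs1.drop cs2.length) pos1 pos2 (cs2.length : Int)
    else if cs2.length > cs1.length then
      -- phase 3 of A: only updates pos2, then falls through to 'return -1'
      let _pos2 := ((cs2.drop cs1.length).foldl (fun p c => if c = '+' then p + 1 else p) pos2);
      (-1 : Int)
    else -1

-- ===== PORT B =====
-- for i in range(1, len(m1)+1): recursion over the index list; s[:i] with 0 ≤ i is
-- List.take i.toNat (exact: the indices are ≥ 1), str.count('+') is List.count '+'.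
def persecucionAltLoop (cs1 cs2 : List Char) (dini : Int) : List Int → Int
  | [] => -1
  | i :: rest =>
      if ((cs1.take i.toNat).count '+' : Int) - ((cs2.take i.toNat).count '+' : Int) ≥ dini then i
      else persecucionAltLoop cs1 cs2 dini rest

def persecucion_alt (m1 : String) (m2 : String) (dini : Int) : Int :=
  persecucionAltLoop m1.toList m2.toList dini
    (PySem.List.pyRange 1 ((m1.toList.length : Int) + 1) 1)

-- ===== PRECONDITION & SPEC =====
def Spec_persecucion (m1 : String) (m2 : String) (dini : Int) (out : Int) : Prop := out = persecucion_alt m1 m2 dini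
instance (m1 : String) (m2 : String) (dini : Int) (out : Int) : Decidable (Spec_persecucion m1 m2 dini out) := by unfold Spec_persecucion; infer_instance

-- ===== CLAIM (what is proved, stated in full; the proofs are below) =====
def Claim_equal_persecucion : Prop := ∀ (m1 : String) (m2 : String) (dini : Int), Dom_persecucion m1 m2 dini → Spec_persecucion m1 m2 dini (persecucion m1 m2 dini)

-- ===== LEMMAS AND PROOFS =====

-- bridge: the fused single loop both programs are proved equal to
def bridgeLoop : List Char → List Char → Int → Int → Int → Int
  | [], _, _, _, _ => -1
  | c1 :: t1, cs2, pos1, pos2, i =>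
      let pos1 := if c1 = '+' then pos1 + 1 else pos1
      let pos2 := match cs2 with
        | c2 :: _ => if c2 = '+' then pos2 + 1 else pos2
        | [] => pos2
      if pos1 ≥ pos2 then i + 1 else bridgeLoop t1 cs2.tail pos1 pos2 (i + 1)

-- once m2 is exhausted, the bridge loop is exactly A's phase-2 loop
theorem bridgeLoop_nil (cs1 : List Char) (pos1 pos2 i : Int) :
    bridgeLoop cs1 [] pos1 pos2 i = persecucionLoop2 cs1 pos1 pos2 i := by
  induction cs1 generalizing pos1 pos2 i with
  | nil => rfl
  | cons c1 t1 ih =>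
      simp only [bridgeLoop, persecucionLoop2, List.tail_nil]
      generalize (if c1 = '+' then pos1 + 1 else pos1) = q1
      by_cases hge : q1 ≥ pos2
      · simp only [if_pos hge]
      · simp only [if_neg hge, ih]

-- the bridge loop equals A's phase decomposition, for arbitrary state
theorem bridgeLoop_eq_phases (cs1 : List Char) (cs2 : List Char) (pos1 pos2 i : Int) :
    bridgeLoop cs1 cs2 pos1 pos2 i =
      match persecucionLoop1 cs1 cs2 pos1 pos2 i with
      | .inl r => r
      | .inr (p1, p2) =>
        if cs1.length > cs2.length then
          persecucionLoop2 (cs1.drop cs2.length) p1 p2 (i + (cs2.length : Int))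
        else -1 := by
  induction cs1 generalizing cs2 pos1 pos2 i with
  | nil =>
      cases cs2 <;> simp [bridgeLoop, persecucionLoop1]
  | cons c1 t1 ih =>
      cases cs2 with
      | nil =>
          rw [bridgeLoop_nil]
          simp [persecucionLoop1]
      | cons c2 t2 =>
          simp only [bridgeLoop, persecucionLoop1, List.tail_cons]
          generalize (if c1 = '+' then pos1 + 1 else pos1) = q1
          generalize (if c2 = '+' then pos2 + 1 else pos2) = q2
          by_cases hge : q1 ≥ q2
          · simp only [if_pos hge]
          · simp only [if_neg hge, ih]
            cases persecucionLoop1 t1 t2 q1 q2 (i + 1) with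
            | inl r => rfl
            | inr p =>
                obtain ⟨p1, p2⟩ := p
                simp only [List.length_cons, List.drop_succ_cons]
                by_cases h : t1.length > t2.length
                · rw [if_pos h, if_pos (show t1.length + 1 > t2.length + 1 by omega)]
                  congr 1
                  push_cast
                  ring
                · rw [if_neg h, if_neg (show ¬ (t1.length + 1 > t2.length + 1) by omega)]

-- counting '+' across an appended singleton, in Int form
theorem count_append_singleton_int (l : List Char) (c : Char) :
    (((l ++ [c]).count '+' : Nat) : Int)
      = if c = '+' then ((l.count '+' : Nat) : Int) + 1 else ((l.count '+' : Nat) : Int) := by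
  by_cases hc : c = '+' <;> simp [hc, List.count_append]

-- B's prefix-count search equals the bridge loop, with the consumed prefix generalized
theorem altLoop_eq_bridge (full2 : List Char) (dini : Int) :
    ∀ (cs1 pre1 : List Char),
      persecucionAltLoop (pre1 ++ cs1) full2 dini
        (PySem.List.pyRange ((pre1.length : Int) + 1) (((pre1.length + cs1.length : Nat) : Int) + 1) 1)
      = bridgeLoop cs1 (full2.drop pre1.length) ((pre1.count '+' : Int))
          (dini + ((full2.take pre1.length).count '+' : Int)) (pre1.length : Int) := by
  intro cs1
  induction cs1 with
  | nil =>
      intro pre1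
      rw [PySem.List.pyRange_one_eq_nil (by simp)]
      rfl
  | cons c t ih =>
      intro pre1
      have hk : ((pre1.length : Int) + 1) < ((pre1.length + (c :: t).length : Nat) : Int) + 1 := by
        simp only [List.length_cons]; push_cast; omega
      rw [PySem.List.pyRange_one_cons hk]
      have htoNat : ((pre1.length : Int) + 1).toNat = pre1.length + 1 := by omega
      have htake1 : (pre1 ++ c :: t).take (pre1.length + 1) = pre1 ++ [c] := by
        rw [List.take_add, List.take_left, List.drop_left]
        rfl
      have hIH := ih (pre1 ++ [c])
      simp only [List.append_assoc, List.cons_append, List.nil_append, List.length_append,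
        List.length_cons, List.length_nil, Nat.zero_add] at hIH
      have hrange : PySem.List.pyRange (((pre1.length + 1 : Nat) : Int) + 1)
            (((pre1.length + 1 + t.length : Nat) : Int) + 1) 1
          = PySem.List.pyRange ((pre1.length : Int) + 1 + 1)
            (((pre1.length + (c :: t).length : Nat) : Int) + 1) 1 := by
        simp only [List.length_cons]
        congr 1
        omega
      rw [hrange] at hIH
      cases hd : full2.drop pre1.length with
      | nil =>
          have htF2 : full2.take (pre1.length + 1) = full2.take pre1.length := by
            rw [List.take_add, hd]
            simp
          have hdrop' : full2.drop (pre1.length + 1) = [] := by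
            rw [← List.drop_drop, hd]
            rfl
          rw [hdrop', htF2] at hIH
          rw [count_append_singleton_int] at hIH
          push_cast at hIH
          simp only [persecucionAltLoop, bridgeLoop, htoNat, htake1, htF2, List.tail_nil]
          rw [count_append_singleton_int]
          push_cast
          have hiff : ((if c = '+' then ((pre1.count '+' : Nat) : Int) + 1 else ((pre1.count '+' : Nat) : Int))
                - (((full2.take pre1.length).count '+' : Nat) : Int) ≥ dini)
              ↔ ((if c = '+' then ((pre1.count '+' : Nat) : Int) + 1 else ((pre1.count '+' : Nat) : Int))
                ≥ dini + (((full2.take pre1.length).count '+' : Nat) : Int)) := by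
            by_cases hc : c = '+' <;> simp [hc] <;> omega
          by_cases hge : (if c = '+' then ((pre1.count '+' : Nat) : Int) + 1 else ((pre1.count '+' : Nat) : Int))
              ≥ dini + (((full2.take pre1.length).count '+' : Nat) : Int)
          · rw [if_pos (hiff.mpr hge), if_pos hge]
          · rw [if_neg (fun h => hge (hiff.mp h)), if_neg hge, hIH]
      | cons c2 r =>
          have htF2 : full2.take (pre1.length + 1) = full2.take pre1.length ++ [c2] := by
            rw [List.take_add, hd]
            rfl
          have hdrop' : full2.drop (pre1.length + 1) = r := by
            rw [← List.drop_drop, hd]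
            rfl
          rw [hdrop', htF2] at hIH
          rw [count_append_singleton_int, count_append_singleton_int] at hIH
          push_cast at hIH
          have hp2 : dini + (if c2 = '+' then (((full2.take pre1.length).count '+' : Nat) : Int) + 1
                else (((full2.take pre1.length).count '+' : Nat) : Int))
              = (if c2 = '+' then dini + (((full2.take pre1.length).count '+' : Nat) : Int) + 1
                else dini + (((full2.take pre1.length).count '+' : Nat) : Int)) := by
            by_cases hc2 : c2 = '+'
            · simp [hc2]; ring
            · simp [hc2]
          rw [hp2] at hIH
          simp only [persecucionAltLoop, bridgeLoop, htoNat, htake1, htF2, List.tail_cons]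
          rw [count_append_singleton_int, count_append_singleton_int]
          push_cast
          have hiff : ((if c = '+' then ((pre1.count '+' : Nat) : Int) + 1 else ((pre1.count '+' : Nat) : Int))
                - (if c2 = '+' then (((full2.take pre1.length).count '+' : Nat) : Int) + 1
                   else (((full2.take pre1.length).count '+' : Nat) : Int)) ≥ dini)
              ↔ ((if c = '+' then ((pre1.count '+' : Nat) : Int) + 1 else ((pre1.count '+' : Nat) : Int))
                ≥ (if c2 = '+' then dini + (((full2.take pre1.length).count '+' : Nat) : Int) + 1
                   else dini + (((full2.take pre1.length).count '+' : Nat) : Int))) := by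
            by_cases hc : c = '+' <;> by_cases hc2 : c2 = '+' <;> simp [hc, hc2] <;> omega
          by_cases hge : (if c = '+' then ((pre1.count '+' : Nat) : Int) + 1 else ((pre1.count '+' : Nat) : Int))
              ≥ (if c2 = '+' then dini + (((full2.take pre1.length).count '+' : Nat) : Int) + 1
                 else dini + (((full2.take pre1.length).count '+' : Nat) : Int))
          · rw [if_pos (hiff.mpr hge), if_pos hge]
          · rw [if_neg (fun h => hge (hiff.mp h)), if_neg hge, hIH]

theorem persecucion_spec : Claim_equal_persecucion := by
  intro m1 m2 dini _
  simp only [Spec_persecucion, persecucion, persecucion_alt]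
  have h := altLoop_eq_bridge m2.toList dini m1.toList []
  simp only [List.nil_append, List.length_nil, Nat.cast_zero, zero_add,
    List.drop_zero, List.take_zero, List.count_nil, add_zero] at h
  rw [h, bridgeLoop_eq_phases]
  cases persecucionLoop1 m1.toList m2.toList 0 dini 0 with
  | inl r => rfl
  | inr p =>
      obtain ⟨p1, p2⟩ := p
      dsimp only
      by_cases hl : m1.toList.length > m2.toList.length
      · simp only [if_pos hl, zero_add]
      · simp only [if_neg hl]
        split <;> rfl
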